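-- pv_equiv track=rewrite | github.com/CircuitSetup/EasyEDA-to-Fusion360-Eagle | src/easyeda2fusion/builders/net_aliases.py | pick_canonical_net_name
-- ===== SOURCE A (Python) =====
-- def pick_canonical_net_name(names: list[str]) -> str:
--     cleaned = [str(name or "").strip() for name in names if str(name or "").strip()]
--     if not cleaned:
--         return ""
--
--     def sort_key(value: str) -> tuple[int, int, str]:
--         upper = value.upper()
--         anonymous = 1 if upper.startswith("N$") else 0
--         return (anonymous, len(value), upper)
--
--     return sorted(cleaned, key=sort_key)[0]
-- ===== SOURCE B (Python) =====
-- def pick_canonical_net_name(names: list[str]) -> str: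
--     best = None
--     best_key = None
--     for name in names:
--         value = str(name or "").strip()
--         if not value:
--             continue
--         upper = value.upper()
--         key = (1 if upper.startswith("N$") else 0, len(value), upper)
--         if best is None or key < best_key:
--             best = value
--             best_key = key
--     return best if best is not None else ""
-- ===== Notes on version B (the rewrite author's own statement) =====
-- stated objective: faster
-- what changed: Replaces building the cleaned list, fully sorting it by the key tuple and indexing element 0 with one fused pass over names that strips each name, skips blanks, and keeps the first element whose key tuple is strictly minimal.
import Mathlib
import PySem

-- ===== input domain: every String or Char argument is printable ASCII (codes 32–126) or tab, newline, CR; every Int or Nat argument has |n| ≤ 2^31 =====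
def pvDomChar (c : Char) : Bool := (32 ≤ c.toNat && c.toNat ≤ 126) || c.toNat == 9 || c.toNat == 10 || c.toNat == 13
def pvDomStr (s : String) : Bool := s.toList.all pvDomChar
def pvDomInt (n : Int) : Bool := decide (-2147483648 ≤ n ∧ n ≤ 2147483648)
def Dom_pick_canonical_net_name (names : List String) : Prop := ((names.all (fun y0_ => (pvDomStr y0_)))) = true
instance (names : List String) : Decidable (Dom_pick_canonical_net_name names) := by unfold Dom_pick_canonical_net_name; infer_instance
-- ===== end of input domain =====

-- B replaces A's full stable sort + index 0 by a single fused linear scan keeping the first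
-- key-minimal stripped name (same return value, one pass instead of a sort).

-- ===== PORT A =====
-- Python's strict '<' on A's sort-key tuples (anonymous, len(value), upper): lexicographic, left to right.
def pySortLt (a b : String) : Bool :=
  let ua := PySem.Str.upper a
  let ub := PySem.Str.upper b
  let aa : Int := if PySem.Str.startswith ua "N$" then 1 else 0
  let ab : Int := if PySem.Str.startswith ub "N$" then 1 else 0
  decide (aa < ab) || (aa == ab && (decide (PySem.Str.len a < PySem.Str.len b) ||
    (PySem.Str.len a == PySem.Str.len b && decide (ua < ub))))

def pick_canonical_net_name (names : List String) : String :=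
  let cleaned := (names.map (fun name => PySem.Str.strip name)).filter (fun s => !(s == ""))
  if cleaned = [] then ""
  else
    -- sorted(cleaned, key=sort_key): PySem.List.sorted written in its defining foldl/insertBy form
    -- (PySem.List.sorted_eq_foldl_insertBy is rfl) with the tuple '<' spelt out, because Mathlib's
    -- Prod.Lex Decidable instance cannot be executed by #eval (it crashes the evaluator).
    let sortedCleaned := cleaned.foldl (fun acc x => PySem.List.insertBy pySortLt x acc) []
    match sortedCleaned.head? with
    | some v => v
    | none => ""   -- unreachable: a sort of a nonempty list is nonempty

-- ===== PORT B =====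
-- Python tuple comparison for the key triple (strict '<', left to right).
def tupLt (a b : Int × Int × String) : Bool :=
  decide (a.1 < b.1) || (a.1 == b.1 && (decide (a.2.1 < b.2.1) || (a.2.1 == b.2.1 && decide (a.2.2 < b.2.2))))

def altKey (value : String) : Int × Int × String :=
  let upper := PySem.Str.upper value
  ((if PySem.Str.startswith upper "N$" then 1 else 0), PySem.Str.len value, upper)

def pick_canonical_net_name_alt (names : List String) : String :=
  let r := names.foldl (fun (best : Option (String × (Int × Int × String))) name =>
      let value := PySem.Str.strip name
      if value == "" then best
      else
        let key := altKey value
        match best with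
        | none => some (value, key)
        | some (b, bk) => if tupLt key bk then some (value, key) else some (b, bk)) none
  match r with
  | some (b, _) => b
  | none => ""

-- ===== PRECONDITION & SPEC =====
def Spec_pick_canonical_net_name (names : List String) (out : String) : Prop := out = pick_canonical_net_name_alt names
instance (names : List String) (out : String) : Decidable (Spec_pick_canonical_net_name names out) := by unfold Spec_pick_canonical_net_name; infer_instance

-- ===== CLAIM (what is proved, stated in full; the proofs are below) =====
def Claim_equal_pick_canonical_net_name : Prop := ∀ (names : List String), Dom_pick_canonical_net_name names → Spec_pick_canonical_net_name names (pick_canonical_net_name names)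

-- ===== LEMMAS AND PROOFS =====

-- the single step of B's running first-minimum, as a named function (shared by the lemmas below)
def minStep (o : Option String) (v : String) : Option String :=
  some (match o with | none => v | some b => if tupLt (altKey v) (altKey b) then v else b)

-- B's comparison of two values through their keys
def pLt (a b : String) : Bool := tupLt (altKey a) (altKey b)

-- A's spelt-out tuple comparison is exactly B's comparison through altKey.
theorem pySortLt_eq_pLt : pySortLt = pLt := by
  funext a b
  simp [pySortLt, pLt, tupLt, altKey]

-- insertBy only changes the head when the new element goes strictly first.
theorem head?_insertBy {α : Type} (p : α → α → Bool) (x : α) (ys : List α) :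
    (PySem.List.insertBy p x ys).head? =
      some (match ys.head? with | none => x | some h => if p x h then x else h) := by
  cases ys with
  | nil => simp [PySem.List.insertBy]
  | cons y t =>
    by_cases h : p x y = true <;> simp [PySem.List.insertBy, h]

-- head of the insertion-sort fold = the running first-minimum fold.
theorem head?_foldl_insertBy (l : List String) (acc : List String) :
    (l.foldl (fun a x => PySem.List.insertBy pLt x a) acc).head? =
      l.foldl minStep acc.head? := by
  induction l generalizing acc with
  | nil => simp
  | cons x t ih =>
    simp only [List.foldl_cons]
    rw [ih, head?_insertBy]
    cases hacc : acc.head?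
    · simp [minStep]
    · simp [minStep, pLt]
      rfl

-- the running-minimum fold never drops back to none
theorem foldl_min_isSome (t : List String) (b : String) :
    ∃ m, t.foldl minStep (some b) = some m := by
  induction t generalizing b with
  | nil => exact ⟨b, rfl⟩
  | cons x t ih =>
    simp only [List.foldl_cons, minStep]
    by_cases h : tupLt (altKey x) (altKey b) = true <;> simp [h] <;> exact ih _

-- B's fused fold over names = the plain first-minimum fold over cleaned, with the stored key
-- always being altKey of the stored value.
theorem b_fold_eq (l : List String) (acc : Option String) :
    (l.foldl (fun (best : Option (String × (Int × Int × String))) name =>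
      let value := PySem.Str.strip name
      if value == "" then best
      else
        let key := altKey value
        match best with
        | none => some (value, key)
        | some (b, bk) => if tupLt key bk then some (value, key) else some (b, bk))
      (acc.map (fun b => (b, altKey b)))) =
    (((l.map (fun name => PySem.Str.strip name)).filter (fun s => !(s == ""))).foldl
      minStep acc).map (fun b => (b, altKey b)) := by
  induction l generalizing acc with
  | nil => simp
  | cons x t ih =>
    by_cases hx : PySem.Str.strip x = ""
    · simpa [hx, minStep] using ih acc
    · cases acc with
      | none => simpa [hx, minStep] using ih (some (PySem.Str.strip x))
      | some b =>
        by_cases hk : tupLt (altKey (PySem.Str.strip x)) (altKey b) = true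
        · simpa [hx, hk, minStep] using ih (some (PySem.Str.strip x))
        · simpa [hx, hk, minStep] using ih (some b)

-- head of A's insertion sort over cleaned = B's running first-minimum over cleaned.
theorem head_sorted_eq_min (cleaned : List String) :
    (if cleaned = [] then ""
     else match (cleaned.foldl (fun acc x => PySem.List.insertBy pySortLt x acc) []).head? with
       | some v => v
       | none => "") =
    (match (cleaned.foldl minStep none).map (fun b => (b, altKey b)) with
     | some (b, _) => b
     | none => "") := by
  cases cleaned with
  | nil => simp
  | cons c t =>
    rw [if_neg (by simp), pySortLt_eq_pLt, head?_foldl_insertBy (c :: t) []]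
    simp only [List.head?_nil, List.foldl_cons]
    have h0 : minStep none c = some c := rfl
    rw [h0]
    obtain ⟨m, hm⟩ := foldl_min_isSome t c
    rw [hm]
    rfl

-- ===== VERDICT (by name: the statement is the Claim_ definition above) =====
theorem pick_canonical_net_name_spec : Claim_equal_pick_canonical_net_name := by
  intro names _
  unfold Spec_pick_canonical_net_name pick_canonical_net_name pick_canonical_net_name_alt
  have hb := b_fold_eq names none
  simp only [Option.map_none] at hb
  rw [hb]
  exact head_sorted_eq_min ((names.map (fun name => PySem.Str.strip name)).filter (fun s => !(s == "")))
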